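-- pv_equiv track=rewrite | github.com/hillerlab/TOGA | supply/extract_codon_alignment.py | split_into_codons
-- ===== SOURCE A (Python) =====
-- def split_into_codons(ref_seq, que_seq):
--     """Split sequences into codons.
--
--     Reference-based.
--     """
--     ref_codons = [
--         [],
--     ]
--     que_codons = [
--         [],
--     ]
--     curr_num = 0
--     codon_num = 0
--     for t, q in zip(ref_seq, que_seq):
--         if curr_num == 3:
--             curr_num = 0
--             ref_codons.append([])
--             que_codons.append([])
--         if t != "-":
--             curr_num += 1
--         # add to the last codon:
--         ref_codons[-1].append(t)
--         que_codons[-1].append(q)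
--     # list of lists to list of strings
--     ref_str_codons = ["".join(x) for x in ref_codons]
--     que_str_codons = ["".join(x) for x in que_codons]
--     ref_codon_seq = " ".join(ref_str_codons)
--     que_codon_seq = " ".join(que_str_codons)
--     return ref_codon_seq, que_codon_seq
-- ===== SOURCE B (Python) =====
-- def split_into_codons(ref_seq, que_seq):
--     """Split sequences into codons.
--
--     Reference-based: repeatedly cut off the shortest prefix of the aligned
--     columns containing three non-gap reference characters.
--     """
--     pairs = list(zip(ref_seq, que_seq))
--     n = len(pairs)
--     chunks = []
--     i = 0
--     while True:
--         cnt = 0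
--         j = i
--         while j < n and cnt < 3:
--             if pairs[j][0] != "-":
--                 cnt += 1
--             j += 1
--         chunks.append(pairs[i:j])
--         if j >= n:
--             break
--         i = j
--     ref_codon_seq = " ".join("".join(t for t, _ in ch) for ch in chunks)
--     que_codon_seq = " ".join("".join(q for _, q in ch) for ch in chunks)
--     return ref_codon_seq, que_codon_seq
-- ===== Notes on version B (the rewrite author's own statement) =====
-- stated objective: alternative
-- what changed: A builds nested codon lists with a per-column state machine (reset flag, append-to-last-codon); B instead repeatedly splits off the shortest prefix of the zipped columns containing three non-gap reference characters and joins the chunks.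
import Mathlib
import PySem

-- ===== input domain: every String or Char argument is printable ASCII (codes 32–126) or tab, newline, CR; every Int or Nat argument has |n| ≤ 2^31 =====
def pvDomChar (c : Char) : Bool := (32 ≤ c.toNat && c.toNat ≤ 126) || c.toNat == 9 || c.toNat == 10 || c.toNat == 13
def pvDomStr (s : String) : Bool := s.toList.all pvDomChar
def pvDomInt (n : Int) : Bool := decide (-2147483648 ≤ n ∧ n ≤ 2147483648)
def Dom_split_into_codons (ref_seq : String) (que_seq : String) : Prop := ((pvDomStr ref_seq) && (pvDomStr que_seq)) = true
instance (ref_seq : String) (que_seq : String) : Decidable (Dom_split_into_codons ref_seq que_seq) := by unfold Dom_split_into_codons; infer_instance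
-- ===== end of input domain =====

-- B is an alternative decomposition: instead of A's per-column state machine appending into
-- nested codon lists, B repeatedly cuts off the shortest prefix with three non-gap reference
-- characters; same cost, proved to return the same pair.

-- ===== PORT A =====
-- ref_codons[-1].append(c)
def appLast : List (List Char) → Char → List (List Char)
  | [], _ => []
  | [xs], c => [xs ++ [c]]
  | xs :: r, c => xs :: appLast r c

-- one iteration of A's for-loop over (state = (ref_codons, que_codons, curr_num))
def stepA (s : List (List Char) × List (List Char) × Nat) (p : Char × Char) :
    List (List Char) × List (List Char) × Nat :=
  let rcs := if s.2.2 = 3 then s.1 ++ [[]] else s.1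
  let qcs := if s.2.2 = 3 then s.2.1 ++ [[]] else s.2.1
  let cur0 := if s.2.2 = 3 then 0 else s.2.2
  let cur := if p.1 ≠ '-' then cur0 + 1 else cur0
  (appLast rcs p.1, appLast qcs p.2, cur)

def split_into_codons (ref_seq : String) (que_seq : String) : String × String :=
  let z := ref_seq.toList.zip que_seq.toList
  let s := z.foldl stepA ([[]], [[]], 0)
  (String.intercalate " " (s.1.map String.mk),
   String.intercalate " " (s.2.1.map String.mk))

-- ===== PORT B =====
-- B's inner while loop: split off the shortest prefix containing (3 - cnt) non-gap ref chars
def takeChunk : List (Char × Char) → Nat → List (Char × Char) × List (Char × Char)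
  | [], _ => ([], [])
  | p :: rest, cnt =>
    if cnt < 3 then
      let cnt' := if p.1 ≠ '-' then cnt + 1 else cnt
      let ab := takeChunk rest cnt'
      (p :: ab.1, ab.2)
    else ([], p :: rest)

theorem takeChunk_len : ∀ (l : List (Char × Char)) (c : Nat),
    (takeChunk l c).1.length + (takeChunk l c).2.length = l.length := by
  intro l
  induction l with
  | nil => intro c; simp [takeChunk]
  | cons p rest ih =>
    intro c
    by_cases h : c < 3
    · by_cases hp : p.1 = '-'
      · have := ih c; simp [takeChunk, h, hp]; omega
      · have := ih (c + 1); simp [takeChunk, h, hp]; omega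
    · simp [takeChunk, h]

theorem takeChunk_snd_lt (l : List (Char × Char)) (h : (takeChunk l 0).2 ≠ []) :
    (takeChunk l 0).2.length < l.length := by
  cases l with
  | nil => simp [takeChunk] at h
  | cons p rest =>
    have := takeChunk_len (p :: rest) 0
    have h1 : (takeChunk (p :: rest) 0).1.length ≥ 1 := by
      simp [takeChunk]
    omega

-- B's outer while loop
def chunksB (l : List (Char × Char)) : List (List (Char × Char)) :=
  let ab := takeChunk l 0
  if h : ab.2 = [] then [ab.1] else ab.1 :: chunksB ab.2
termination_by l.length
decreasing_by exact takeChunk_snd_lt l h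

def split_into_codons_alt (ref_seq : String) (que_seq : String) : String × String :=
  let ch := chunksB (ref_seq.toList.zip que_seq.toList)
  (String.intercalate " " (ch.map (fun c => String.mk (c.map Prod.fst))),
   String.intercalate " " (ch.map (fun c => String.mk (c.map Prod.snd))))

-- ===== PRECONDITION & SPEC =====
def Spec_split_into_codons (ref_seq : String) (que_seq : String) (out : String × String) : Prop := out = split_into_codons_alt ref_seq que_seq
instance (ref_seq : String) (que_seq : String) (out : String × String) : Decidable (Spec_split_into_codons ref_seq que_seq out) := by unfold Spec_split_into_codons; infer_instance

-- ===== CLAIM (what is proved, stated in full; the proofs are below) =====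
def Claim_equal_split_into_codons : Prop := ∀ (ref_seq : String) (que_seq : String), Dom_split_into_codons ref_seq que_seq → Spec_split_into_codons ref_seq que_seq (split_into_codons ref_seq que_seq)

-- ===== LEMMAS AND PROOFS =====

-- prepend p to the first group (creating one if none)
def cons1 (p : Char × Char) : List (List (Char × Char)) → List (List (Char × Char))
  | [] => [[p]]
  | h :: t => (p :: h) :: t

-- the tail of A's codon structure from the middle of the loop: remaining columns l, counter cur
def cont : List (Char × Char) → Nat → List (List (Char × Char))
  | [], _ => [[]]
  | p :: l, cur =>
    let base := if cur = 3 then 0 else cur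
    let c' := if p.1 ≠ '-' then base + 1 else base
    let rest := cons1 p (cont l c')
    if cur = 3 then [] :: rest else rest

def glue (x : List Char) : List (List Char) → List (List Char)
  | [] => [x]
  | h :: t => (x ++ h) :: t

theorem appLast_append (ys : List (List Char)) (xs : List Char) (c : Char) :
    appLast (ys ++ [xs]) c = ys ++ [xs ++ [c]] := by
  induction ys with
  | nil => simp [appLast]
  | cons y ys ih =>
    cases ys with
    | nil => simp [appLast]
    | cons z zs => simpa [appLast] using ih

theorem map_cons1_fst (p : Char × Char) (xss : List (List (Char × Char))) :
    (cons1 p xss).map (fun c => c.map Prod.fst) =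
      glue [p.1] (xss.map (fun c => c.map Prod.fst)) := by
  cases xss <;> simp [cons1, glue]

theorem map_cons1_snd (p : Char × Char) (xss : List (List (Char × Char))) :
    (cons1 p xss).map (fun c => c.map Prod.snd) =
      glue [p.2] (xss.map (fun c => c.map Prod.snd)) := by
  cases xss <;> simp [cons1, glue]

theorem glue_glue (x : List Char) (c : Char) (ys : List (List Char)) :
    glue x (glue [c] ys) = glue (x ++ [c]) ys := by
  cases ys <;> simp [glue]

theorem foldA_inv : ∀ (l : List (Char × Char)) (r0 q0 : List (List Char))
    (rl ql : List Char) (cur : Nat),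
    (List.foldl stepA (r0 ++ [rl], q0 ++ [ql], cur) l).1 =
        r0 ++ glue rl ((cont l cur).map (fun c => c.map Prod.fst)) ∧
    (List.foldl stepA (r0 ++ [rl], q0 ++ [ql], cur) l).2.1 =
        q0 ++ glue ql ((cont l cur).map (fun c => c.map Prod.snd)) := by
  intro l
  induction l with
  | nil => intro r0 q0 rl ql cur; simp [cont, glue]
  | cons p l ih =>
    intro r0 q0 rl ql cur
    by_cases h : cur = 3
    · subst h
      have hstep : stepA (r0 ++ [rl], q0 ++ [ql], 3) p =
          ((r0 ++ [rl]) ++ [[p.1]], (q0 ++ [ql]) ++ [[p.2]],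
            if p.1 ≠ '-' then 1 else 0) := by
        simp [stepA]
        constructor
        · have := appLast_append (r0 ++ [rl]) [] p.1; simpa using this
        · have := appLast_append (q0 ++ [ql]) [] p.2; simpa using this
      obtain ⟨ih1, ih2⟩ := ih (r0 ++ [rl]) (q0 ++ [ql]) [p.1] [p.2]
        (if p.1 ≠ '-' then 1 else 0)
      have hcont : cont (p :: l) 3 =
          [] :: cons1 p (cont l (if p.1 ≠ '-' then 1 else 0)) := by
        simp [cont]
      constructor
      · rw [List.foldl_cons, hstep, ih1, hcont]
        simp [map_cons1_fst, glue]
      · rw [List.foldl_cons, hstep, ih2, hcont]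
        simp [map_cons1_snd, glue]
    · have hstep : stepA (r0 ++ [rl], q0 ++ [ql], cur) p =
          (r0 ++ [rl ++ [p.1]], q0 ++ [ql ++ [p.2]],
            if p.1 ≠ '-' then cur + 1 else cur) := by
        simp [stepA, h, appLast_append]
      obtain ⟨ih1, ih2⟩ := ih r0 q0 (rl ++ [p.1]) (ql ++ [p.2])
        (if p.1 ≠ '-' then cur + 1 else cur)
      have hcont : cont (p :: l) cur =
          cons1 p (cont l (if p.1 ≠ '-' then cur + 1 else cur)) := by
        simp [cont, h]
      constructor
      · rw [List.foldl_cons, hstep, ih1, hcont, map_cons1_fst, glue_glue]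
      · rw [List.foldl_cons, hstep, ih2, hcont, map_cons1_snd, glue_glue]

theorem cont_three (l : List (Char × Char)) :
    cont l 3 = if l = [] then [[]] else [] :: cont l 0 := by
  cases l <;> simp [cont]

theorem cont_takeChunk : ∀ (l : List (Char × Char)) (cnt : Nat), cnt < 3 →
    cont l cnt = if (takeChunk l cnt).2 = [] then [(takeChunk l cnt).1]
      else (takeChunk l cnt).1 :: cont (takeChunk l cnt).2 0 := by
  intro l
  induction l with
  | nil => intro cnt _; simp [cont, takeChunk]
  | cons p l ih =>
    intro cnt hc
    have hc3 : cnt ≠ 3 := by omega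
    by_cases hc' : (if p.1 ≠ '-' then cnt + 1 else cnt) < 3
    · have := ih (if p.1 ≠ '-' then cnt + 1 else cnt) hc'
      simp only [cont, takeChunk, hc3, if_false, hc, if_true]
      rw [this]
      cases htc : (takeChunk l (if p.1 ≠ '-' then cnt + 1 else cnt)).2 <;>
        simp [cons1]
    · simp only [cont, takeChunk, hc3, if_false, hc, if_true]
      have h3 : (if p.1 ≠ '-' then cnt + 1 else cnt) = 3 := by
        by_cases hp : p.1 ≠ '-' <;> simp [hp] at hc' ⊢ <;> omega
      rw [h3, cont_three]
      cases l with
      | nil => simp [takeChunk, cons1]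
      | cons q l' => simp [takeChunk, cons1]

theorem cons1_ne_nil (p : Char × Char) (xss : List (List (Char × Char))) :
    cons1 p xss ≠ [] := by
  cases xss <;> simp [cons1]

theorem cont_ne_nil (l : List (Char × Char)) (c : Nat) : cont l c ≠ [] := by
  cases l with
  | nil => simp [cont]
  | cons p l =>
    simp only [cont]
    split
    · simp
    · exact cons1_ne_nil _ _

theorem chunksB_eq_cont (l : List (Char × Char)) : chunksB l = cont l 0 := by
  induction hn : l.length using Nat.strong_induction_on generalizing l with
  | _ n ih =>
    rw [chunksB, cont_takeChunk l 0 (by omega)]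
    split
    · rfl
    · next h =>
      congr 1
      exact ih _ (hn ▸ takeChunk_snd_lt l h) _ rfl

theorem glue_nil (xss : List (List Char)) (h : xss ≠ []) : glue [] xss = xss := by
  cases xss <;> simp_all [glue]

-- ===== VERDICT (by name: the statement is the Claim_ definition above) =====
theorem split_into_codons_spec : Claim_equal_split_into_codons := by
  intro ref_seq que_seq _
  unfold Spec_split_into_codons
  obtain ⟨h1, h2⟩ := foldA_inv (ref_seq.toList.zip que_seq.toList) [] [] [] [] 0
  simp only [List.nil_append] at h1 h2
  simp only [split_into_codons, split_into_codons_alt]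
  rw [h1, h2, glue_nil _ (by simp [cont_ne_nil]), glue_nil _ (by simp [cont_ne_nil]),
    chunksB_eq_cont]
  simp [List.map_map, Function.comp_def]
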